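-- pv_equiv track=rewrite | github.com/moarseniy/idea | gradio_service/scripts/xml_scripts/profile2entities.py | _choose_key_hints
-- ===== SOURCE A (Python) =====
-- from typing import Dict, Any, Tuple, List, Set
--
-- ID_HINTS = [
--     "cad_number", "record_number", "section_number",
--     "ord_nmb", "number_pp", "num_geopoint",
--     "id", "guid", "uuid", "code"
-- ]
--
-- def _choose_key_hints(fields: List[Dict[str, Any]]) -> List[str]:
--     """До 4-х лучших кандидатов по словарю ID_HINTS, ближе к корню — лучше."""
--     def score(f):
--         base = f["path"].split("/")[-1]
--         try:
--             pri = ID_HINTS.index(base)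
--         except ValueError:
--             pri = 999
--         depth = len(f["path"].split("/"))
--         return (pri, depth, len(f["path"]))
--     cands = sorted(fields, key=score)
--     top = [f["path"] for f in cands if f["path"].split("/")[-1] in ID_HINTS][:4]
--     return top
-- ===== SOURCE B (Python) =====
-- from typing import Dict, Any, List
--
-- ID_HINTS = [
--     "cad_number", "record_number", "section_number",
--     "ord_nmb", "number_pp", "num_geopoint",
--     "id", "guid", "uuid", "code"
-- ]
--
-- def _choose_key_hints(fields: List[Dict[str, Any]]) -> List[str]:
--     """Bucket fields by which ID hint their last path segment matches, sort each
--     bucket by (depth, length) only, and concatenate buckets in hint priority order."""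
--     buckets = [[f for f in fields if f["path"].split("/")[-1] == h] for h in ID_HINTS]
--     out = []
--     for b in buckets:
--         for f in sorted(b, key=lambda f: (len(f["path"].split("/")), len(f["path"]))):
--             out.append(f["path"])
--     return out[:4]
-- ===== Notes on version B (the rewrite author's own statement) =====
-- stated objective: alternative
-- what changed: Instead of sorting all fields under one (priority, depth, length) tuple key and then filtering, B builds one bucket per ID hint, stable-sorts each bucket by (depth, length) only, and concatenates buckets in hint priority order, so non-candidate fields are never sorted and no 999 priority sentinel exists.
import Mathlib
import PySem

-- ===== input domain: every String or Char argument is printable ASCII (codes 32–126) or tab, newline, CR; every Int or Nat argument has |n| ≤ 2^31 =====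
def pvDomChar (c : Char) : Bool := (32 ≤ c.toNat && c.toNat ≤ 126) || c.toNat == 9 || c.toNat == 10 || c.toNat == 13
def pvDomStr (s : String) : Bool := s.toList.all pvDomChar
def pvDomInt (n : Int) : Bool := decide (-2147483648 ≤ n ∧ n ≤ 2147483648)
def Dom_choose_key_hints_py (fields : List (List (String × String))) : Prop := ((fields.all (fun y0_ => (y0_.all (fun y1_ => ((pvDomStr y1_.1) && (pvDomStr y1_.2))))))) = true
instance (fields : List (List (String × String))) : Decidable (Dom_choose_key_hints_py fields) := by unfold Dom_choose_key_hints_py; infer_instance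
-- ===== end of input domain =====

-- B replaces A's global sort of all fields under a (priority, depth, length) key by per-hint
-- buckets each sorted by (depth, length) only, concatenated in hint order (objective: alternative).

-- ===== PORT A =====
-- helpers shared by both ports: they transliterate the identical Python expressions
-- f["path"], f["path"].split("/")[-1], len(f["path"].split("/")), len(f["path"]) that occur
-- verbatim in both Source A and Source B.
def pvIdHints : List String :=
  ["cad_number", "record_number", "section_number",
   "ord_nmb", "number_pp", "num_geopoint",
   "id", "guid", "uuid", "code"]

-- f["path"]; the KeyError case (key absent) is excluded by Pre_ below
def pvPath (f : List (String × String)) : String := ((PySem.Dict.mk f).get? "path").getD ""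
-- f["path"].split("/"): exact, the separator "/" is nonempty so split? is always some
def pvParts (f : List (String × String)) : List String := (PySem.Str.split? (pvPath f) "/").getD []
-- parts[-1]: exact, split? never returns an empty list so pyGet? at -1 is always some
def pvBase (f : List (String × String)) : String := (PySem.List.pyGet? (pvParts f) (-1)).getD ""
def pvDepth (f : List (String × String)) : Int := ((pvParts f).length : Int)
def pvLen (f : List (String × String)) : Int := PySem.Str.len (pvPath f)
-- A's pri: ID_HINTS.index(base) with 999 on ValueError
def pvPri (f : List (String × String)) : Int :=
  match PySem.List.index? pvIdHints (pvBase f) with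
  | some i => (i : Int)
  | none => 999
-- Python's comparison of the score tuples (pri, depth, len): lexicographic
def pvScoreLt (a b : List (String × String)) : Bool :=
  decide (pvPri a < pvPri b) ||
    (decide (pvPri a = pvPri b) &&
      (decide (pvDepth a < pvDepth b) ||
        (decide (pvDepth a = pvDepth b) && decide (pvLen a < pvLen b))))

def choose_key_hints_py (fields : List (List (String × String))) : List String :=
  -- sorted(fields, key=score): PySem's stable insertion sort (sorted_eq_foldl_insertBy)
  -- written with the explicit tuple comparator pvScoreLt, since the key is a 3-tuple
  let cands := fields.foldl (fun acc f => PySem.List.insertBy pvScoreLt f acc) []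
  ((cands.filter (fun f => pvIdHints.contains (pvBase f))).map pvPath).take 4

-- ===== PORT B =====
def choose_key_hints_py_alt (fields : List (List (String × String))) : List String :=
  let buckets := pvIdHints.map (fun h => fields.filter (fun f => pvBase f == h))
  let out := buckets.foldl (fun acc b =>
      (PySem.List.sorted2 b pvDepth pvLen).foldl (fun acc2 f => acc2 ++ [pvPath f]) acc) []
  out.take 4

-- ===== PRECONDITION & SPEC =====
-- Pre_ excludes exactly the inputs where the Python raises KeyError: a field without a "path" key.
def Pre_choose_key_hints_py (fields : List (List (String × String))) : Prop :=
  ∀ f ∈ fields, ((PySem.Dict.mk f).get? "path").isSome = true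
instance (fields : List (List (String × String))) : Decidable (Pre_choose_key_hints_py fields) := by unfold Pre_choose_key_hints_py; infer_instance

def pvWitness_choose_key_hints_py : (List (List (String × String))) := [[("path", "a/id")], [("path", "code")]]

def Spec_choose_key_hints_py (fields : List (List (String × String))) (out : List String) : Prop := out = choose_key_hints_py_alt fields
instance (fields : List (List (String × String))) (out : List String) : Decidable (Spec_choose_key_hints_py fields out) := by unfold Spec_choose_key_hints_py; infer_instance

-- ===== CLAIM (what is proved, stated in full; the proofs are below) =====
def Claim_equal_choose_key_hints_py : Prop := ∀ (fields : List (List (String × String))), Dom_choose_key_hints_py fields → Pre_choose_key_hints_py fields → Spec_choose_key_hints_py fields (choose_key_hints_py fields)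

-- ===== LEMMAS AND PROOFS =====

-- A's score tuple as a lexicographically ordered triple (Python tuple comparison)
def pvKey3 (f : List (String × String)) : Int ×ₗ Int ×ₗ Int :=
  toLex (pvPri f, toLex (pvDepth f, pvLen f))

theorem pv_key3_lt_iff (a b : List (String × String)) :
    pvKey3 a < pvKey3 b ↔
      (pvPri a < pvPri b ∨ (pvPri a = pvPri b ∧
        (pvDepth a < pvDepth b ∨ (pvDepth a = pvDepth b ∧ pvLen a < pvLen b)))) := by
  unfold pvKey3
  rw [Prod.Lex.toLex_lt_toLex, Prod.Lex.toLex_lt_toLex]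

theorem pv_scoreLt_eq (a b : List (String × String)) :
    pvScoreLt a b = decide (pvKey3 a < pvKey3 b) := by
  unfold pvScoreLt
  rw [Bool.eq_iff_iff]
  simp [pv_key3_lt_iff]

theorem pv_sortA_eq (fields : List (List (String × String))) :
    fields.foldl (fun acc f => PySem.List.insertBy pvScoreLt f acc) [] =
      PySem.List.sorted fields pvKey3 := by
  rw [PySem.List.sorted_eq_foldl_insertBy]
  apply PySem.List.foldl_congr_mem
  intro acc x _
  rw [show pvScoreLt = (fun a b => decide (pvKey3 a < pvKey3 b)) from
    funext fun a => funext fun b => pv_scoreLt_eq a b]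

theorem pv_insertBy_nil {α : Type} (b : α → α → Bool) (x : α) :
    PySem.List.insertBy b x [] = [x] := by simp [PySem.List.insertBy]

theorem pv_insertBy_cons {α : Type} (b : α → α → Bool) (x y : α) (ys : List α) :
    PySem.List.insertBy b x (y :: ys) =
      if b x y then x :: y :: ys else y :: PySem.List.insertBy b x ys := by
  simp [PySem.List.insertBy]

theorem pv_sorted_nil {α : Type} (key : α → Int ×ₗ Int ×ₗ Int) :
    PySem.List.sorted ([] : List α) key = [] := by simp [PySem.List.sorted]

theorem pv_sorted_append {α : Type} (xs : List α) (x : α) (key : α → Int ×ₗ Int ×ₗ Int) :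
    PySem.List.sorted (xs ++ [x]) key =
      PySem.List.insertBy (fun a b => decide (key a < key b)) x (PySem.List.sorted xs key) := by
  simp [PySem.List.sorted, List.foldl_append]

theorem pv_sorted2_nil {α : Type} (k1 k2 : α → Int) :
    PySem.List.sorted2 ([] : List α) k1 k2 = [] := by simp [PySem.List.sorted2]

theorem pv_sorted2_append {α : Type} (xs : List α) (x : α) (k1 k2 : α → Int) :
    PySem.List.sorted2 (xs ++ [x]) k1 k2 =
      PySem.List.insertBy
        (fun a b => decide (k1 a < k1 b) || (!decide (k1 b < k1 a) && decide (k2 a < k2 b)))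
        x (PySem.List.sorted2 xs k1 k2) := by
  simp [PySem.List.sorted2, List.foldl_append]

theorem pv_pri_nonneg (f : List (String × String)) : 0 ≤ pvPri f := by
  unfold pvPri
  cases PySem.List.index? pvIdHints (pvBase f) <;> simp

theorem pv_hints_length : pvIdHints.length = 10 := by decide

theorem pv_contains_eq (f : List (String × String)) :
    pvIdHints.contains (pvBase f) = decide (pvPri f < 10) := by
  unfold pvPri
  cases h : PySem.List.index? pvIdHints (pvBase f) with
  | none =>
    have hnm : pvBase f ∉ pvIdHints := (PySem.List.index?_eq_none_iff _ _).mp h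
    simp [hnm]
  | some j =>
    obtain ⟨hk, hje, -⟩ := PySem.List.getElem_of_index?_eq_some h
    have hm : pvBase f ∈ pvIdHints := hje ▸ pvIdHints.getElem_mem hk
    have hj : (j : Int) < 10 := by
      have h10 := pv_hints_length ▸ hk; exact_mod_cast h10
    simp only [hj, decide_true]
    exact List.elem_eq_true_of_mem hm

theorem pv_pri_eq_iff (f : List (String × String)) (i : Nat) (hi : i < 10) :
    pvPri f = (i : Int) ↔ pvBase f = pvIdHints.getD i "" := by
  have hlen : i < pvIdHints.length := by rw [pv_hints_length]; exact hi
  have hnd : pvIdHints.Nodup := by decide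
  unfold pvPri
  cases h : PySem.List.index? pvIdHints (pvBase f) with
  | none =>
    have hnm : pvBase f ∉ pvIdHints := (PySem.List.index?_eq_none_iff _ _).mp h
    simp only [h]
    constructor
    · intro h9; omega
    · intro hb
      exact absurd (hb ▸ (List.getD_eq_getElem pvIdHints "" hlen ▸ pvIdHints.getElem_mem hlen)) hnm
  | some j =>
    obtain ⟨hk, hje, -⟩ := PySem.List.getElem_of_index?_eq_some h
    simp only [h]
    rw [List.getD_eq_getElem pvIdHints "" hlen]
    constructor
    · intro hji
      have hji' : j = i := by exact_mod_cast hji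
      subst hji'
      exact hje.symm
    · intro hb
      have hgl : pvIdHints[j] = pvIdHints[i] := hje.trans hb
      have hji : j = i := (List.Nodup.getElem_inj_iff hnd).mp hgl
      exact_mod_cast congrArg (fun (k : Nat) => (k : Int)) hji

theorem pv_key3_le_pri (a b : List (String × String)) (h : pvKey3 a ≤ pvKey3 b) :
    pvPri a ≤ pvPri b := by
  unfold pvKey3 at h
  rcases Prod.Lex.toLex_le_toLex.mp h with h1 | ⟨h1, -⟩
  · exact le_of_lt h1
  · exact le_of_eq h1

theorem pv_lt3_eq_lt2 (x z : List (String × String)) (h : pvPri x = pvPri z) :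
    (decide (pvKey3 x < pvKey3 z)) =
      (decide (pvDepth x < pvDepth z) ||
        (!decide (pvDepth z < pvDepth x) && decide (pvLen x < pvLen z))) := by
  have hiff : (pvKey3 x < pvKey3 z) ↔
      (pvDepth x < pvDepth z ∨ (pvDepth x = pvDepth z ∧ pvLen x < pvLen z)) := by
    unfold pvKey3
    rw [Prod.Lex.toLex_lt_toLex, Prod.Lex.toLex_lt_toLex]
    omega
  by_cases h1 : pvDepth x < pvDepth z <;> by_cases h2 : pvDepth z < pvDepth x <;>
    by_cases h3 : pvLen x < pvLen z <;> simp [hiff, h1, h2, h3] <;> omega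

theorem pv_insertBy_lt3_eq_lt2 (x : List (String × String)) (L : List (List (String × String)))
    (hL : ∀ z ∈ L, pvPri z = pvPri x) :
    PySem.List.insertBy (fun a b => decide (pvKey3 a < pvKey3 b)) x L =
      PySem.List.insertBy
        (fun a b => decide (pvDepth a < pvDepth b) ||
          (!decide (pvDepth b < pvDepth a) && decide (pvLen a < pvLen b))) x L := by
  induction L with
  | nil => rw [pv_insertBy_nil, pv_insertBy_nil]
  | cons z zs ih =>
    rw [pv_insertBy_cons, pv_insertBy_cons,
      pv_lt3_eq_lt2 x z (hL z (List.mem_cons_self)).symm]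
    split
    · rfl
    · rw [ih (fun w hw => hL w (List.mem_cons_of_mem z hw))]

-- within one bucket (constant pri) A's triple-key sort is B's pair-key sort
theorem pv_bucket_sorted_eq (c : Int) (ys : List (List (String × String)))
    (h : ∀ f ∈ ys, pvPri f = c) :
    PySem.List.sorted ys pvKey3 = PySem.List.sorted2 ys pvDepth pvLen := by
  induction ys using List.reverseRecOn with
  | nil => rw [pv_sorted_nil, pv_sorted2_nil]
  | append_singleton ys x ih =>
    rw [pv_sorted_append, pv_sorted2_append,
      ih (fun f hf => h f (List.mem_append_left _ hf))]
    apply pv_insertBy_lt3_eq_lt2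
    intro z hz
    have hz' : z ∈ ys := (PySem.List.sorted2_perm ys pvDepth pvLen false).mem_iff.mp hz
    rw [h z (List.mem_append_left _ hz'),
      h x (List.mem_append_right _ List.mem_cons_self)]

theorem pv_insertBy_head_lt (x : List (String × String)) (zs : List (List (String × String)))
    (hz : ∀ z ∈ zs, pvKey3 x < pvKey3 z) :
    PySem.List.insertBy (fun a b => decide (pvKey3 a < pvKey3 b)) x zs = x :: zs := by
  cases zs with
  | nil => exact pv_insertBy_nil _ _
  | cons z zs' =>
    rw [pv_insertBy_cons]
    simp [hz z List.mem_cons_self]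

-- core stability lemma: filtering one pri-class through an insertion into a sorted list
theorem pv_filter_insertBy (c : Int) (x : List (String × String))
    (L : List (List (String × String)))
    (hL : L.Pairwise (fun a b => pvKey3 a ≤ pvKey3 b)) :
    (PySem.List.insertBy (fun a b => decide (pvKey3 a < pvKey3 b)) x L).filter
        (fun f => pvPri f == c) =
      if pvPri x = c then
        PySem.List.insertBy (fun a b => decide (pvKey3 a < pvKey3 b)) x
          (L.filter (fun f => pvPri f == c))
      else L.filter (fun f => pvPri f == c) := by
  induction L with
  | nil =>
    rw [pv_insertBy_nil]
    by_cases hx : pvPri x = c <;> simp [hx, pv_insertBy_nil]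
  | cons y ys ih =>
    rw [pv_insertBy_cons]
    by_cases hxy : decide (pvKey3 x < pvKey3 y) = true
    · rw [if_pos hxy]
      by_cases hx : pvPri x = c
      · rw [if_pos hx]
        have hlt : ∀ z ∈ (y :: ys).filter (fun f => pvPri f == c), pvKey3 x < pvKey3 z := by
          intro z hzf
          have hzm := List.mem_of_mem_filter hzf
          rcases List.mem_cons.mp hzm with rfl | hzys
          · exact of_decide_eq_true hxy
          · exact lt_of_lt_of_le (of_decide_eq_true hxy) ((List.pairwise_cons.mp hL).1 z hzys)
        rw [pv_insertBy_head_lt x _ hlt]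
        simp [List.filter_cons, hx]
      · rw [if_neg hx]
        simp [List.filter_cons, hx]
    · rw [if_neg hxy]
      have hys : ys.Pairwise (fun a b => pvKey3 a ≤ pvKey3 b) := (List.pairwise_cons.mp hL).2
      by_cases hx : pvPri x = c <;> by_cases hy : pvPri y = c <;>
        simp only [List.filter_cons, ih hys, beq_iff_eq, hx, hy, decide_false,
          if_true, if_false, pv_insertBy_cons, hxy, Bool.false_eq_true]

-- a stable sort commutes with filtering one pri-class
theorem pv_filter_sorted (c : Int) (xs : List (List (String × String))) :
    (PySem.List.sorted xs pvKey3).filter (fun f => pvPri f == c) =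
      PySem.List.sorted (xs.filter (fun f => pvPri f == c)) pvKey3 := by
  induction xs using List.reverseRecOn with
  | nil => rw [pv_sorted_nil]; simp [pv_sorted_nil]
  | append_singleton xs x ih =>
    rw [pv_sorted_append, pv_filter_insertBy c x _ (PySem.List.sorted_pairwise xs pvKey3),
      List.filter_append]
    by_cases hx : pvPri x = c
    · rw [if_pos hx, ih]
      simp only [List.filter_cons, List.filter_nil, beq_iff_eq, hx, if_pos]
      rw [pv_sorted_append]
    · rw [if_neg hx, ih]
      simp [hx]

theorem pv_filter_lt_succ (s : List (List (String × String)))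
    (hs : s.Pairwise (fun a b => pvPri a ≤ pvPri b)) (n : Int) :
    s.filter (fun f => decide (pvPri f < n + 1)) =
      s.filter (fun f => decide (pvPri f < n)) ++ s.filter (fun f => pvPri f == n) := by
  induction s with
  | nil => simp
  | cons x t ih =>
    obtain ⟨hx, ht⟩ := List.pairwise_cons.mp hs
    rcases lt_trichotomy (pvPri x) n with h | h | h
    · simp only [List.filter_cons, beq_iff_eq,
        decide_eq_true_eq, if_pos h, if_pos (by omega : pvPri x < n + 1),
        if_neg (by omega : ¬ pvPri x = n)]
      rw [ih ht]; rfl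
    · have htail_lt : t.filter (fun f => decide (pvPri f < n)) = [] := by
        rw [List.filter_eq_nil_iff]
        intro z hz
        have := hx z hz
        simp only [decide_eq_true_eq]; omega
      have htail_eq : t.filter (fun f => decide (pvPri f < n + 1)) =
          t.filter (fun f => pvPri f == n) := by
        apply List.filter_congr
        intro z hz
        have hzx := hx z hz
        rw [Bool.eq_iff_iff, decide_eq_true_eq, beq_iff_eq]
        omega
      simp only [List.filter_cons, beq_iff_eq, decide_eq_true_eq,
        if_pos (by omega : pvPri x < n + 1), if_neg (by omega : ¬ pvPri x < n), if_pos h]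
      rw [htail_lt, htail_eq]; rfl
    · have h1 : t.filter (fun f => decide (pvPri f < n + 1)) = [] := by
        rw [List.filter_eq_nil_iff]
        intro z hz
        have := hx z hz
        simp only [decide_eq_true_eq]; omega
      have h2 : t.filter (fun f => decide (pvPri f < n)) = [] := by
        rw [List.filter_eq_nil_iff]
        intro z hz
        have := hx z hz
        simp only [decide_eq_true_eq]; omega
      have h3 : t.filter (fun f => pvPri f == n) = [] := by
        rw [List.filter_eq_nil_iff]
        intro z hz
        have := hx z hz
        simp only [beq_iff_eq]; omega
      simp only [List.filter_cons, beq_iff_eq, decide_eq_true_eq,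
        if_neg (by omega : ¬ pvPri x < n + 1), if_neg (by omega : ¬ pvPri x < n),
        if_neg (by omega : ¬ pvPri x = n)]
      rw [h1, h2, h3]; rfl

-- decompose a pri-monotone list into its pri-classes, in pri order
theorem pv_filter_decomp (s : List (List (String × String)))
    (hs : s.Pairwise (fun a b => pvPri a ≤ pvPri b)) (n : Nat) :
    s.filter (fun f => decide (pvPri f < (n : Int))) =
      (List.range n).flatMap (fun (i : Nat) => s.filter (fun f => pvPri f == (i : Int))) := by
  induction n with
  | zero =>
    simp only [List.range_zero, List.flatMap_nil]
    rw [List.filter_eq_nil_iff]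
    intro z _
    have := pv_pri_nonneg z
    simp only [decide_eq_true_eq]; omega
  | succ m ih =>
    rw [List.range_succ, List.flatMap_append, ← ih,
      (by push_cast; ring_nf : ((m + 1 : Nat) : Int) = (m : Int) + 1),
      pv_filter_lt_succ s hs (m : Int)]
    simp

theorem pv_hints_eq_range_map :
    pvIdHints = (List.range 10).map (fun i => pvIdHints.getD i "") := by decide

-- ===== VERDICT (by name: the statement is the Claim_ definition above) =====
theorem choose_key_hints_py_spec : Claim_equal_choose_key_hints_py := by
  intro fields _ _
  unfold Spec_choose_key_hints_py choose_key_hints_py choose_key_hints_py_alt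
  simp only [PySem.List.foldl_append_singleton_eq_map, PySem.List.foldl_append_eq_flatMap,
    List.nil_append, List.flatMap_map, pv_sortA_eq]
  -- both sides are (·.take 4) of a map of a flatMap; reduce to the underlying lists
  congr 1
  -- A's filter predicate is pri < 10
  rw [show (fun f => pvIdHints.contains (pvBase f)) =
      (fun f => decide (pvPri f < ((10 : Nat) : Int))) from
    funext fun f => by rw [pv_contains_eq f]; norm_num]
  have hmono : (PySem.List.sorted fields pvKey3).Pairwise (fun a b => pvPri a ≤ pvPri b) :=
    (PySem.List.sorted_pairwise fields pvKey3).imp (fun h => pv_key3_le_pri _ _ h)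
  rw [pv_filter_decomp _ hmono 10, List.map_flatMap, pv_hints_eq_range_map, List.flatMap_map,
    List.flatMap_def, List.flatMap_def]
  apply congrArg
  apply List.map_congr_left
  intro i hi
  have hi10 : i < 10 := List.mem_range.mp hi
  have hbucket : fields.filter (fun f => pvPri f == (i : Int)) =
      fields.filter (fun f => pvBase f == pvIdHints.getD i "") := by
    apply List.filter_congr
    intro f _
    rw [Bool.eq_iff_iff, beq_iff_eq, beq_iff_eq]
    exact pv_pri_eq_iff f i hi10
  rw [pv_filter_sorted, hbucket,
    pv_bucket_sorted_eq (i : Int) _ (fun f hf => by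
      have hbm := List.of_mem_filter (p := fun f => pvBase f == pvIdHints.getD i "") hf
      exact (pv_pri_eq_iff f i hi10).mpr (by simpa using hbm))]
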